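-- pv_equiv track=rewrite | github.com/blegloannec/CodeProblems | CodinGame/Community/gravity_centrifuge.py | decode_stream
-- ===== SOURCE A (Python) =====
-- def decode_stream(S):
--     count = drive = 0
--     Momentum = [1,1]
--     for c in S:
--         b = ord(c)-ord('0')
--         for _ in range(3):
--             if b&1:
--                 count += Momentum[drive]
--             Momentum[drive^1] += Momentum[drive]
--             drive ^= 1
--             b >>= 1
--     return count
-- ===== SOURCE B (Python) =====
-- def decode_stream(S):
--     # Backward Horner-style fold: process bits last-to-first maintaining the
--     # pair (x, y) with x_k = sum_{j>=k} bit_j*F(j-k+1), y_k = x_{k+1};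
--     # no Fibonacci weights or momentum table are materialised.
--     x = y = 0
--     for c in reversed(S):
--         b = ord(c) - 48
--         for i in (2, 1, 0):
--             x, y = ((b >> i) & 1) + x + y, x
--     return x + y
-- ===== Notes on version B (the rewrite author's own statement) =====
-- stated objective: alternative
-- what changed: A scans forward maintaining a mutable two-cell Fibonacci momentum table, a drive index toggled per bit and a guarded accumulator; B scans the bit stream backward with a Horner-style linear fold on a pair (x, y) <- (bit + x + y, x), so no Fibonacci weights, drive toggle or momentum table exist at all.
import Mathlib
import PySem

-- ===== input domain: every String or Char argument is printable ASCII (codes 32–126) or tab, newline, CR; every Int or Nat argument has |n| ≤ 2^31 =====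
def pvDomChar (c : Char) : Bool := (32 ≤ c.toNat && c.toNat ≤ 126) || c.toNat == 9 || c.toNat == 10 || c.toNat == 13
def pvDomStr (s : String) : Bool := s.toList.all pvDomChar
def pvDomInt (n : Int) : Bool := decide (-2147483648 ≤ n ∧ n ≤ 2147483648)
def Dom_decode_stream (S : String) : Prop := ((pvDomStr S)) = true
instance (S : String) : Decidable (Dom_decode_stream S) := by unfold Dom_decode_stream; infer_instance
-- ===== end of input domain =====

-- B replaces A's forward Fibonacci/momentum accumulation by a backward Horner-style
-- fold over the bits keeping only a pair (x, y); alternative decomposition, same O(n) pass.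

-- ===== PORT A =====
-- per-character body of A's outer loop: b = ord(c) - ord('0'), then the 3-iteration
-- inner loop over state (count, drive, Momentum[0], Momentum[1], b).
-- 'b & 1' = PySem.Int.mod b 2 and 'b >>= 1' = floor division by 2 (exact for Python ints);
-- 'drive ^= 1' on drive ∈ {0,1} is written 1 - drive (exact on the reachable values 0 and 1).
def pvStepA (st : Int × Int × Int × Int) (c : Char) : Int × Int × Int × Int :=
  let b : Int := (c.toNat : Int) - 48
  let s := (List.range 3).foldl
    (fun (s : Int × Int × Int × Int × Int) _ =>
      let count := s.1; let drive := s.2.1; let m0 := s.2.2.1; let m1 := s.2.2.2.1; let b := s.2.2.2.2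
      let md := if drive = 0 then m0 else m1
      let count := if PySem.Int.mod b 2 = 1 then count + md else count
      let m0' := if drive = 0 then m0 else m0 + m1
      let m1' := if drive = 0 then m1 + m0 else m1
      (count, 1 - drive, m0', m1', PySem.Int.floordiv b 2))
    (st.1, st.2.1, st.2.2.1, st.2.2.2, b)
  (s.1, s.2.1, s.2.2.1, s.2.2.2.1)

def decode_stream (S : String) : Int :=
  (S.toList.foldl pvStepA (0, 0, 1, 1)).1

-- ===== PORT B =====
-- per-character body of B's loop: bits of b = ord(c) - 48 taken high-to-low,
-- (x, y) <- (bit + x + y, x); '(b >> i) & 1' = mod (floordiv b 2^i) 2 (exact for Python ints).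
def pvStepB (xy : Int × Int) (c : Char) : Int × Int :=
  let b : Int := (c.toNat : Int) - 48
  ([2, 1, 0] : List Nat).foldl
    (fun (xy : Int × Int) i =>
      (PySem.Int.mod (PySem.Int.floordiv b ((2 : Int) ^ i)) 2 + xy.1 + xy.2, xy.1))
    xy

def decode_stream_alt (S : String) : Int :=
  let xy := S.toList.reverse.foldl pvStepB (0, 0)
  xy.1 + xy.2

-- ===== PRECONDITION & SPEC =====
def Spec_decode_stream (S : String) (out : Int) : Prop := out = decode_stream_alt S
instance (S : String) (out : Int) : Decidable (Spec_decode_stream S out) := by unfold Spec_decode_stream; infer_instance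

-- ===== CLAIM (what is proved, stated in full; the proofs are below) =====
def Claim_equal_decode_stream : Prop := ∀ (S : String), Dom_decode_stream S → Spec_decode_stream S (decode_stream S)

-- ===== LEMMAS AND PROOFS =====

-- the three bits both programs extract from a character (b = ord(c) - 48, floor div/mod)
def pvB (c : Char) : Int := (c.toNat : Int) - 48
def pvBit0 (c : Char) : Int := pvB c % 2
def pvBit1 (c : Char) : Int := pvB c / 2 % 2
def pvBit2 (c : Char) : Int := pvB c / 2 / 2 % 2

lemma pv_dd (b : Int) : b / 2 / 2 = b / 4 := by
  rw [Int.ediv_ediv_of_nonneg (by norm_num : (0:Int) ≤ 2)]; norm_num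

-- one character of A, from drive = 0 resp. drive = 1, in closed form over the three bits
lemma pv_stepA_eq0 (c : Char) (count m0 m1 : Int) :
    pvStepA (count, 0, m0, m1) c =
      (count + pvBit0 c * m0 + pvBit1 c * (m1 + m0) + pvBit2 c * (2 * m0 + m1),
       1, 2 * m0 + m1, 3 * m0 + 2 * m1) := by
  have hr : List.range 3 = [0, 1, 2] := rfl
  simp only [pvStepA, hr, List.foldl]
  norm_num
  rcases Int.emod_two_eq_zero_or_one ((c.toNat : Int) - 48) with h0 | h0 <;>
    rcases Int.emod_two_eq_zero_or_one (((c.toNat : Int) - 48) / 2) with h1 | h1 <;>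
    rcases Int.emod_two_eq_zero_or_one (((c.toNat : Int) - 48) / 2 / 2) with h2 | h2 <;>
    simp [pvBit0, pvBit1, pvBit2, pvB, h0, h1, h2] <;> and_intros <;> first | trivial | ring

lemma pv_stepA_eq1 (c : Char) (count m0 m1 : Int) :
    pvStepA (count, 1, m0, m1) c =
      (count + pvBit0 c * m1 + pvBit1 c * (m0 + m1) + pvBit2 c * (m0 + 2 * m1),
       0, 2 * m0 + 3 * m1, m0 + 2 * m1) := by
  have hr : List.range 3 = [0, 1, 2] := rfl
  simp only [pvStepA, hr, List.foldl]
  norm_num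
  rcases Int.emod_two_eq_zero_or_one ((c.toNat : Int) - 48) with h0 | h0 <;>
    rcases Int.emod_two_eq_zero_or_one (((c.toNat : Int) - 48) / 2) with h1 | h1 <;>
    rcases Int.emod_two_eq_zero_or_one (((c.toNat : Int) - 48) / 2 / 2) with h2 | h2 <;>
    simp [pvBit0, pvBit1, pvBit2, pvB, h0, h1, h2] <;> and_intros <;> first | trivial | ring

-- one character of B, in closed form over the same three bits
lemma pv_stepB_eq (c : Char) (x y : Int) :
    pvStepB (x, y) c =
      (pvBit0 c + pvBit1 c + 2 * pvBit2 c + 3 * x + 2 * y,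
       pvBit1 c + pvBit2 c + 2 * x + y) := by
  simp only [pvStepB, List.foldl]
  norm_num
  simp only [pvBit0, pvBit1, pvBit2, pvB, pv_dd]
  constructor <;> ring

-- the fold invariant: A's count over cs from (count, d, m0, m1) equals count plus
-- B's backward pair over cs weighted by the momenta as seen from the current drive
lemma pv_fold_rel : ∀ (cs : List Char) (count d m0 m1 : Int), d = 0 ∨ d = 1 →
    (cs.foldl pvStepA (count, d, m0, m1)).1 =
      count +
        (cs.foldr (fun c xy => pvStepB xy c) ((0 : Int), (0 : Int))).1 * (if d = 0 then m0 else m1) +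
        (cs.foldr (fun c xy => pvStepB xy c) ((0 : Int), (0 : Int))).2 * (if d = 0 then m1 else m0) := by
  intro cs
  induction cs with
  | nil => intro count d m0 m1 hd; simp
  | cons c cs ih =>
    intro count d m0 m1 hd
    have hB : List.foldr (fun c xy => pvStepB xy c) ((0 : Int), (0 : Int)) (c :: cs) =
        pvStepB ((cs.foldr (fun c xy => pvStepB xy c) ((0 : Int), (0 : Int))).1,
                 (cs.foldr (fun c xy => pvStepB xy c) ((0 : Int), (0 : Int))).2) c := by
      rw [Prod.mk.eta]; rfl
    rcases hd with h | h
    · subst h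
      rw [List.foldl_cons, pv_stepA_eq0, ih _ 1 _ _ (Or.inr rfl), hB, pv_stepB_eq]
      norm_num; ring
    · subst h
      rw [List.foldl_cons, pv_stepA_eq1, ih _ 0 _ _ (Or.inl rfl), hB, pv_stepB_eq]
      norm_num; ring

-- ===== VERDICT (by name: the statement is the Claim_ definition above) =====
theorem decode_stream_spec : Claim_equal_decode_stream := by
  intro S _
  unfold Spec_decode_stream decode_stream decode_stream_alt
  rw [List.foldl_reverse]
  have h := pv_fold_rel S.toList 0 0 1 1 (Or.inl rfl)
  norm_num at h
  rw [h]
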